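-- pv_equiv track=rewrite | github.com/Arsen1302/Code-copy-detector | TestData/solutions/problem_1456_3.py | solution_1456_3
-- ===== SOURCE A (Python) =====
-- def solution_1456_3(s: str) -> bool:
--     found = False
--     for c in s:
--         if c == 'b':
--             found = True
--         elif found:
--             return False
--     return True
-- ===== SOURCE B (Python) =====
-- def solution_1456_3(s: str) -> bool:
--     # strip the maximal run of trailing 'b's, then no 'b' may remain
--     t = s.rstrip('b')
--     return 'b' not in t
-- ===== Notes on version B (the rewrite author's own statement) =====
-- stated objective: alternative
-- what changed: Instead of a forward flag-carrying scan, B works from the other end: it strips the maximal trailing run of the target character with rstrip and then checks that none remains, using that the property holds iff all occurrences form a contiguous suffix block.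
import Mathlib
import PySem

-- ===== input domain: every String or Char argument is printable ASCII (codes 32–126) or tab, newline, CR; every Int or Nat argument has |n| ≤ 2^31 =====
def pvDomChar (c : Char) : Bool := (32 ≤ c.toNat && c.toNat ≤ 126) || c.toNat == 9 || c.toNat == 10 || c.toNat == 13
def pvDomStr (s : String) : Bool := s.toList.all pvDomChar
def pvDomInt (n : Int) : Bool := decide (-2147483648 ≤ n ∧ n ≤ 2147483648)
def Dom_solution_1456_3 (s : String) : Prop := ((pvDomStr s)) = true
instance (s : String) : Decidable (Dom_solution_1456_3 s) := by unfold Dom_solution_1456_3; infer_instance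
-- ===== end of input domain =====

-- B replaces A's forward flag-carrying scan by a backwards decomposition: strip the
-- maximal trailing run of 'b' (rstrip('b')) and check no 'b' remains (alternative, same cost).

-- ===== PORT A =====
-- the for-loop with its early 'return False', carrying the 'found' flag
def solution_1456_3_loop : List Char → Bool → Bool
  | [], _ => true
  | c :: cs, found =>
    if c = 'b' then solution_1456_3_loop cs true
    else if found then false
    else solution_1456_3_loop cs found

def solution_1456_3 (s : String) : Bool :=
  solution_1456_3_loop s.toList false

-- ===== PORT B =====
-- s.rstrip('b'): drop the trailing run of 'b' — hand port (reverse / dropWhile / reverse), exact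
def rstripB (l : List Char) : List Char :=
  (l.reverse.dropWhile (fun c => c == 'b')).reverse

def solution_1456_3_alt (s : String) : Bool :=
  !(PySem.Chars.isIn ['b'] (rstripB s.toList))   -- 'b' not in s.rstrip('b')

-- ===== PRECONDITION & SPEC =====
def Spec_solution_1456_3 (s : String) (out : Bool) : Prop := out = solution_1456_3_alt s
instance (s : String) (out : Bool) : Decidable (Spec_solution_1456_3 s out) := by unfold Spec_solution_1456_3; infer_instance

-- ===== CLAIM (what is proved, stated in full; the proofs are below) =====
def Claim_equal_solution_1456_3 : Prop := ∀ (s : String), Dom_solution_1456_3 s → Spec_solution_1456_3 s (solution_1456_3 s)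

-- ===== LEMMAS AND PROOFS =====

-- once the flag is set, A just checks the rest is all 'b'
lemma loop_true_eq_all (l : List Char) :
    solution_1456_3_loop l true = l.all (fun c => c == 'b') := by
  induction l with
  | nil => rfl
  | cons c cs ih =>
    simp only [solution_1456_3_loop, List.all_cons]
    by_cases h : c = 'b' <;> simp [h, ih]

-- A equals the middle predicate "the suffix from the first 'b' on is all 'b'"
lemma loop_false_eq_mid (l : List Char) :
    solution_1456_3_loop l false
      = (l.dropWhile (fun c => !(c == 'b'))).all (fun c => c == 'b') := by
  induction l with
  | nil => rfl
  | cons c cs ih =>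
    by_cases h : c = 'b'
    · simp [solution_1456_3_loop, h, loop_true_eq_all]
    · simp [solution_1456_3_loop, h, ih]

-- appending one more 'b' does not change the middle predicate
lemma mid_append_b (t : List Char) :
    ((t ++ ['b']).dropWhile (fun c => !(c == 'b'))).all (fun c => c == 'b')
      = (t.dropWhile (fun c => !(c == 'b'))).all (fun c => c == 'b') := by
  induction t with
  | nil => simp [List.dropWhile]
  | cons x t ih =>
    by_cases h : x = 'b'
    · simp [h]
    · simpa [List.dropWhile_cons, h] using ih

-- appending a non-'b' character: the middle predicate holds iff t is 'b'-free
lemma mid_append_nonb (t : List Char) (c : Char) (hc : ¬ c = 'b') :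
    (((t ++ [c]).dropWhile (fun c => !(c == 'b'))).all (fun c => c == 'b') = true)
      ↔ 'b' ∉ t := by
  induction t with
  | nil => simp [List.dropWhile, hc]
  | cons x t ih =>
    by_cases h : x = 'b'
    · rw [List.cons_append, List.dropWhile_cons_of_neg (by simp [h])]
      constructor
      · intro hall
        have := List.all_eq_true.mp hall c (by simp)
        exact absurd (by simpa using this) hc
      · intro hn
        exact absurd (by simp [h] : ('b' : Char) ∈ x :: t) hn
    · rw [List.cons_append, List.dropWhile_cons_of_pos (by simp [h]), ih]
      constructor
      · intro hn hm
        rcases List.mem_cons.mp hm with h1 | h1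
        · exact h h1.symm
        · exact hn h1
      · intro hn hm
        exact hn (List.mem_cons_of_mem _ hm)

-- B's condition, read on the reversed list, equals the middle predicate
lemma B_eq_mid (m : List Char) :
    ('b' ∉ m.dropWhile (fun c => c == 'b'))
      ↔ ((m.reverse.dropWhile (fun c => !(c == 'b'))).all (fun c => c == 'b') = true) := by
  induction m with
  | nil => simp
  | cons c ms ih =>
    by_cases h : c = 'b'
    · rw [List.dropWhile_cons_of_pos (by simp [h]),
        show (c :: ms).reverse = ms.reverse ++ [c] by simp, h, mid_append_b]
      exact ih
    · rw [List.dropWhile_cons_of_neg (by simp [h]),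
        show (c :: ms).reverse = ms.reverse ++ [c] by simp,
        mid_append_nonb ms.reverse c h]
      simp only [List.mem_reverse]
      constructor
      · intro hn hm
        exact hn (List.mem_cons_of_mem _ hm)
      · intro hn hm
        rcases List.mem_cons.mp hm with h1 | h1
        · exact h h1.symm
        · exact hn h1

-- ===== VERDICT (by name: the statement is the Claim_ definition above) =====
theorem solution_1456_3_spec : Claim_equal_solution_1456_3 := by
  intro s _
  unfold Spec_solution_1456_3 solution_1456_3 solution_1456_3_alt rstripB
  set l := s.toList
  rw [loop_false_eq_mid]
  by_cases hmem : 'b' ∈ l.reverse.dropWhile (fun c => c == 'b')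
  · have hin : PySem.Chars.isIn ['b'] ((l.reverse.dropWhile (fun c => c == 'b')).reverse) = true := by
      rw [PySem.Chars.isIn_iff_infix, List.singleton_infix_iff]
      simpa using hmem
    have hmid : (l.dropWhile (fun c => !(c == 'b'))).all (fun c => c == 'b') = false := by
      rw [Bool.eq_false_iff]
      intro hx
      exact (B_eq_mid l.reverse).mpr (by simpa using hx) hmem
    simp [hin, hmid]
  · have hin : PySem.Chars.isIn ['b'] ((l.reverse.dropWhile (fun c => c == 'b')).reverse) = false := by
      rw [PySem.Chars.isIn_eq_false_iff, List.singleton_infix_iff]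
      simpa using hmem
    have hmid := (B_eq_mid l.reverse).mp hmem
    rw [List.reverse_reverse] at hmid
    simp [hin, hmid]
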